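-- pv_equiv track=rewrite | github.com/hotzeng/K2ILA | src/translate_single_file.py | pick_top_comma
-- ===== SOURCE A (Python) =====
-- def pick_top_comma(params):
--     params = list(params)
--     parenthesesNo = 0
--     for i in range(len(params)):
--         if params[i] == '(':
--             parenthesesNo += 1
--         elif params[i] == ')':
--             parenthesesNo -= 1
--         elif params[i] == ',':
--             if parenthesesNo == 0:
--                 params[i] = '|'
--
--     return ''.join(params)
-- ===== SOURCE B (Python) =====
-- def pick_top_comma(params):
--     # Split on commas, then rejoin the segments, choosing '|' for a separator
--     # whose preceding segments have balanced parentheses, ',' otherwise.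
--     parts = params.split(',')
--     out = [parts[0]]
--     bal = parts[0].count('(') - parts[0].count(')')
--     for seg in parts[1:]:
--         out.append('|' if bal == 0 else ',')
--         out.append(seg)
--         bal += seg.count('(') - seg.count(')')
--     return ''.join(out)
-- ===== Notes on version B (the rewrite author's own statement) =====
-- stated objective: faster
-- what changed: instead of A's per-character loop with a running depth counter, B splits the string on commas and rejoins the segments, picking the separator from the parenthesis balance accumulated over the preceding segments via str.count
import Mathlib
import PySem

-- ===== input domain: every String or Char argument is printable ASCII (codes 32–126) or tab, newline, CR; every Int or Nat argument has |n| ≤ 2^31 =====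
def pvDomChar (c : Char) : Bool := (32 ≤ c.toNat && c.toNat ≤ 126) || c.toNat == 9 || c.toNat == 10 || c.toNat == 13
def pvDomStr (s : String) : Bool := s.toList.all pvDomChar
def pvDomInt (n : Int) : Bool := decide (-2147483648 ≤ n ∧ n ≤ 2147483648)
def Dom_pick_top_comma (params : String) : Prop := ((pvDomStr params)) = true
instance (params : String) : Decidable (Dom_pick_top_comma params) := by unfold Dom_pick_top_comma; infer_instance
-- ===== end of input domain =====

-- B: split on commas, rejoin segments with '|' or ',' chosen by the accumulated
-- parenthesis balance of the preceding segments (alternative decomposition, same cost).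

-- ===== PORT A =====
-- A: one loop over the characters with a running parentheses counter, rewriting ',' at depth 0.
def pickA : Int → List Char → List Char
  | _, [] => []
  | n, c :: rest =>
    if c = '(' then c :: pickA (n + 1) rest
    else if c = ')' then c :: pickA (n - 1) rest
    else if c = ',' then (if n = 0 then '|' else c) :: pickA n rest
    else c :: pickA n rest

def pick_top_comma (params : String) : String :=
  String.ofList (pickA 0 params.toList)

-- ===== PORT B =====
-- params.split(','): ported by hand, exact (segments between commas, in order).
def pvSplit : List Char → List (List Char)
  | [] => [[]]
  | c :: rest =>
    match pvSplit rest with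
    | [] => [[c]]          -- unreachable: pvSplit never returns []
    | s :: ss => if c = ',' then [] :: s :: ss else (c :: s) :: ss

-- seg.count('(') - seg.count(')')
def pvBal (s : List Char) : Int := (s.count '(' : Int) - (s.count ')' : Int)

-- the for-loop over parts[1:] with accumulators (out, bal)
def pvJoin : Int → List (List Char) → List Char
  | _, [] => []
  | bal, seg :: rest => (if bal = 0 then '|' else ',') :: (seg ++ pvJoin (bal + pvBal seg) rest)

def pick_top_comma_alt (params : String) : String :=
  match pvSplit params.toList with
  | [] => ""
  | s :: rest => String.ofList (s ++ pvJoin (pvBal s) rest)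

-- ===== PRECONDITION & SPEC =====
def Spec_pick_top_comma (params : String) (out : String) : Prop := out = pick_top_comma_alt params
instance (params : String) (out : String) : Decidable (Spec_pick_top_comma params out) := by unfold Spec_pick_top_comma; infer_instance

-- ===== CLAIM (what is proved, stated in full; the proofs are below) =====
def Claim_equal_pick_top_comma : Prop := ∀ (params : String), Dom_pick_top_comma params → Spec_pick_top_comma params (pick_top_comma params)

-- ===== LEMMAS AND PROOFS =====
theorem pvSplit_ne_nil (l : List Char) : pvSplit l ≠ [] := by
  cases l with
  | nil => simp [pvSplit]
  | cons c rest =>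
    cases h : pvSplit rest with
    | nil => simp [pvSplit, h]
    | cons s ss => simp only [pvSplit, h]; split <;> simp

theorem pickA_split (l : List Char) : ∀ n : Int,
    pickA n l = (match pvSplit l with
      | [] => []
      | s :: rest => s ++ pvJoin (n + pvBal s) rest) := by
  induction l with
  | nil => intro n; rfl
  | cons c rest ih =>
    intro n
    rcases hs : pvSplit rest with _ | ⟨s, ss⟩
    · exact absurd hs (pvSplit_ne_nil rest)
    · by_cases h1 : c = '('
      · simp only [pickA, pvSplit, hs, h1, ih, if_true]
        simp [pvBal]
        ring_nf
      · by_cases h2 : c = ')'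
        · simp only [pickA, pvSplit, hs, h2, ih, if_true]
          simp [pvBal]
          ring_nf
        · by_cases h3 : c = ','
          · simp only [pickA, pvSplit, hs, h3, ih, if_true]
            simp [pvBal, pvJoin]
          · simp only [pickA, pvSplit, hs, h1, h2, h3, ih, if_false]
            simp [pvBal, h1, h2]

-- ===== VERDICT (by name: the statement is the Claim_ definition above) =====
theorem pick_top_comma_spec : Claim_equal_pick_top_comma := by
  intro params _
  unfold Spec_pick_top_comma pick_top_comma pick_top_comma_alt
  rw [pickA_split]
  rcases hs : pvSplit params.toList with _ | ⟨s, ss⟩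
  · exact absurd hs (pvSplit_ne_nil params.toList)
  · simp
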